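-- pv_equiv track=rewrite | github.com/SaFD-00/GUI-Model | GUI-Model/scripts/_unsloth_infer.py | _split_conversation
-- ===== SOURCE A (Python) =====
-- def _split_conversation(messages: list[dict]) -> tuple[list[dict], str]:
--     """마지막 `from==gpt` 턴을 label, 그 앞을 context 로 분리.
--
--     Stage 1/2 의 test JSONL 은 single-turn (system → human → gpt) 구조라 첫 gpt
--     턴에서 멈추면 된다.
--     """
--     convo: list[dict] = []
--     label = ""
--     for m in messages:
--         if m["from"] == "gpt":
--             label = m["value"]
--             break
--         convo.append(m)
--     return convo, label
-- ===== SOURCE B (Python) =====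
-- def _split_conversation(messages: list[dict]) -> tuple[list[dict], str]:
--     idx = next((i for i, m in enumerate(messages) if m["from"] == "gpt"), None)
--     if idx is None:
--         return list(messages), ""
--     return messages[:idx], messages[idx]["value"]
-- ===== Notes on version B (the rewrite author's own statement) =====
-- stated objective: simpler
-- what changed: Replaces the accumulating append-loop with break by computing the first-gpt index via next(enumerate) and returning a slice plus that message's value.
import Mathlib
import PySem

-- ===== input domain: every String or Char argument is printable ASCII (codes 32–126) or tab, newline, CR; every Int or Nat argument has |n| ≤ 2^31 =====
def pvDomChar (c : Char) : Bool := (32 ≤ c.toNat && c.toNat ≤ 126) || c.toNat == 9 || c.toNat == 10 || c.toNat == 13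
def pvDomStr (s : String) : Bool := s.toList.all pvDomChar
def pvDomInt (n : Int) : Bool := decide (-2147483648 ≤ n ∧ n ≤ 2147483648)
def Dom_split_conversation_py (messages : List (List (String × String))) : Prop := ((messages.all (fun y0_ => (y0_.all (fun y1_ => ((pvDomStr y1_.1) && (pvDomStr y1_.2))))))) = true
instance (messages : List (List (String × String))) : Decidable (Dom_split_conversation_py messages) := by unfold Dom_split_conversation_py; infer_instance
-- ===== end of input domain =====

-- B computes the first-gpt index once and returns a slice plus that message's value,
-- replacing A's accumulating append-loop with break: same cost, simpler decomposition.

-- first-match association-list lookup, m[k] as Option (none = KeyError, excluded by Pre_)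
def pvGetKey (m : List (String × String)) (k : String) : Option String :=
  (m.find? (fun p => p.1 == k)).map (·.2)

-- ===== PORT A =====
-- the for-loop with accumulating convo and break; label defaults to ""
def pvSplitGo : List (List (String × String)) → List (List (String × String)) →
    (List (List (String × String))) × String
  | [], convo => (convo, "")
  | m :: rest, convo =>
    if pvGetKey m "from" == some "gpt" then (convo, (pvGetKey m "value").getD "")
    else pvSplitGo rest (convo ++ [m])

def split_conversation_py (messages : List (List (String × String))) : (List (List (String × String))) × String :=
  pvSplitGo messages []

-- ===== PORT B =====
def split_conversation_py_alt (messages : List (List (String × String))) : (List (List (String × String))) × String :=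
  match messages.findIdx? (fun m => pvGetKey m "from" == some "gpt") with
  | none => (messages, "")
  | some i => (messages.take i, ((messages[i]?).bind (fun m => pvGetKey m "value")).getD "")

-- ===== PRECONDITION & SPEC =====
-- Pre_ excludes exactly the inputs where the Pythons raise KeyError: a message before the
-- first gpt turn lacking the "from" key, or the first gpt message lacking the "value" key.
def Pre_split_conversation_py (messages : List (List (String × String))) : Prop :=
  (∀ m ∈ messages.takeWhile (fun m => !(pvGetKey m "from" == some "gpt")),
      (pvGetKey m "from").isSome = true) ∧
  (∀ m ∈ (messages.dropWhile (fun m => !(pvGetKey m "from" == some "gpt"))).take 1,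
      (pvGetKey m "value").isSome = true)
instance (messages : List (List (String × String))) : Decidable (Pre_split_conversation_py messages) := by unfold Pre_split_conversation_py; infer_instance

def pvWitness_split_conversation_py : (List (List (String × String))) :=
  [[("from", "human"), ("value", "hi")], [("from", "gpt"), ("value", "hello")]]

def Spec_split_conversation_py (messages : List (List (String × String))) (out : (List (List (String × String))) × String) : Prop := out = split_conversation_py_alt messages
instance (messages : List (List (String × String))) (out : (List (List (String × String))) × String) : Decidable (Spec_split_conversation_py messages out) := by unfold Spec_split_conversation_py; infer_instance

-- ===== CLAIM (what is proved, stated in full; the proofs are below) =====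
def Claim_equal_split_conversation_py : Prop := ∀ (messages : List (List (String × String))), Dom_split_conversation_py messages → Pre_split_conversation_py messages → Spec_split_conversation_py messages (split_conversation_py messages)

-- ===== LEMMAS AND PROOFS =====

-- loop invariant: A's loop from state (msgs, acc) yields acc prefixed to B's find-then-slice result
theorem pvSplitGo_eq (msgs : List (List (String × String))) :
    ∀ acc, pvSplitGo msgs acc =
      match msgs.findIdx? (fun m => pvGetKey m "from" == some "gpt") with
      | none => (acc ++ msgs, "")
      | some i => (acc ++ msgs.take i, ((msgs[i]?).bind (fun m => pvGetKey m "value")).getD "") := by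
  induction msgs with
  | nil => intro acc; simp [pvSplitGo]
  | cons m rest ih =>
    intro acc
    by_cases h : (pvGetKey m "from" == some "gpt") = true
    · simp [pvSplitGo, h, List.findIdx?_cons]
    · simp only [pvSplitGo, h, if_neg, Bool.false_eq_true, not_false_eq_true,
        List.findIdx?_cons, ih (acc ++ [m])]
      cases hfi : rest.findIdx? (fun m => pvGetKey m "from" == some "gpt") with
      | none => simp
      | some i => simp [List.take_succ_cons]

-- ===== VERDICT (by name: the statement is the Claim_ definition above) =====
theorem split_conversation_py_spec : Claim_equal_split_conversation_py := by
  intro messages _dom _pre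
  unfold Spec_split_conversation_py split_conversation_py split_conversation_py_alt
  rw [pvSplitGo_eq]
  cases messages.findIdx? (fun m => pvGetKey m "from" == some "gpt") <;> simp
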